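-- pv_equiv track=rewrite | github.com/Yasu-San/AdventureOfCode2020 | Doors/Door_17.py | count_active_cubes_4
-- ===== SOURCE A (Python) =====
-- def count_active_cubes_4(cubes: dict) -> int:
--     counter: int = 0
--
--     for x in cubes:
--         for y in cubes[x]:
--             for z in cubes[x][y]:
--                 for w in cubes[x][y][z]:
--                     if cubes[x][y][z][w]:
--                         counter += 1
--
--     return counter
-- ===== SOURCE B (Python) =====
-- def count_active_cubes_4(cubes: dict) -> int:
--     def walk(node):
--         if isinstance(node, dict):
--             return sum(map(walk, node.values()))
--         return 1 if node else 0
--     return walk(cubes)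
-- ===== Notes on version B (the rewrite author's own statement) =====
-- stated objective: simpler
-- what changed: Replaces four hard-coded key-iteration loops with repeated dict lookups by a single recursive walk over the values of the nested dicts, summing the recursion's return values.
import Mathlib
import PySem

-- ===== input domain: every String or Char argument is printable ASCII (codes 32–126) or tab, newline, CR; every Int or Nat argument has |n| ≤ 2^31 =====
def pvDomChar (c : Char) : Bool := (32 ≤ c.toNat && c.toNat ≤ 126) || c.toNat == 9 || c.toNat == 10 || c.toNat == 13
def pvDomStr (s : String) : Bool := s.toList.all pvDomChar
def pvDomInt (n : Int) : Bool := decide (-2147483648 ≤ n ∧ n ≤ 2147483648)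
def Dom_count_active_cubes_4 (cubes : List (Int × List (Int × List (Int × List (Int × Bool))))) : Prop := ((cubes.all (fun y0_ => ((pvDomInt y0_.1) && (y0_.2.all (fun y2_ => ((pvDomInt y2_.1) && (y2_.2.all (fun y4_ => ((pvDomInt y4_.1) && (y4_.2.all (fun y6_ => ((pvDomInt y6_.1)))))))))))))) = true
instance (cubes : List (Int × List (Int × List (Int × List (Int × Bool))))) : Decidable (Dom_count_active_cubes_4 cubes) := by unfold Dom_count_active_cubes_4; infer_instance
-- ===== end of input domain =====

-- B replaces A's four hard-coded key loops with repeated lookups by a recursive walk summing over values (simpler; return value only).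


-- ===== PORT A =====
-- four nested 'for key' loops; each inner dict is obtained by lookup cubes[x][y][z][w]
def count_active_cubes_4 (cubes : List (Int × List (Int × List (Int × List (Int × Bool))))) : Int :=
  let d := PySem.Dict.mk cubes
  d.keys.foldl (fun counter x =>
    let dx := PySem.Dict.mk (d.getD x [])
    dx.keys.foldl (fun counter y =>
      let dy := PySem.Dict.mk (dx.getD y [])
      dy.keys.foldl (fun counter z =>
        let dz := PySem.Dict.mk (dy.getD z [])
        dz.keys.foldl (fun counter w =>
          if dz.getD w false then counter + 1 else counter) counter) counter) counter) 0

-- ===== PORT B =====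
-- B's recursive walk, specialised per nesting level (Lean is typed): sum walk over the values
def pvWalkLeaf (b : Bool) : Int := if b then 1 else 0
def pvWalkW (d : List (Int × Bool)) : Int := (d.map (fun p => pvWalkLeaf p.2)).sum
def pvWalkZ (d : List (Int × List (Int × Bool))) : Int := (d.map (fun p => pvWalkW p.2)).sum
def pvWalkY (d : List (Int × List (Int × List (Int × Bool)))) : Int := (d.map (fun p => pvWalkZ p.2)).sum
def count_active_cubes_4_alt (cubes : List (Int × List (Int × List (Int × List (Int × Bool))))) : Int :=
  (cubes.map (fun p => pvWalkY p.2)).sum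

-- ===== PRECONDITION & SPEC =====
-- Pre_ requires distinct keys at every level of the nested association lists: the argument
-- is a Python dict, whose keys are always distinct, so this excludes no Python input.
def Pre_count_active_cubes_4 (cubes : List (Int × List (Int × List (Int × List (Int × Bool))))) : Prop :=
  (cubes.map Prod.fst).Nodup ∧ ∀ p ∈ cubes, (p.2.map Prod.fst).Nodup ∧
    ∀ q ∈ p.2, (q.2.map Prod.fst).Nodup ∧ ∀ r ∈ q.2, (r.2.map Prod.fst).Nodup
instance (cubes : List (Int × List (Int × List (Int × List (Int × Bool))))) : Decidable (Pre_count_active_cubes_4 cubes) := by unfold Pre_count_active_cubes_4; infer_instance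
def pvWitness_count_active_cubes_4 : (List (Int × List (Int × List (Int × List (Int × Bool))))) :=
  [(1, [(2, [(3, [(4, true), (5, false)])])])]
def Spec_count_active_cubes_4 (cubes : List (Int × List (Int × List (Int × List (Int × Bool))))) (out : Int) : Prop := out = count_active_cubes_4_alt cubes
instance (cubes : List (Int × List (Int × List (Int × List (Int × Bool))))) (out : Int) : Decidable (Spec_count_active_cubes_4 cubes out) := by unfold Spec_count_active_cubes_4; infer_instance

-- ===== CLAIM (what is proved, stated in full; the proofs are below) =====
def Claim_equal_count_active_cubes_4 : Prop := ∀ (cubes : List (Int × List (Int × List (Int × List (Int × Bool))))), Dom_count_active_cubes_4 cubes → Pre_count_active_cubes_4 cubes → Spec_count_active_cubes_4 cubes (count_active_cubes_4 cubes)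

-- ===== LEMMAS AND PROOFS =====

-- a fold over the keys of a dict with distinct keys, looking each key up, is a fold over the pairs
theorem pv_keys_fold {β : Type} (l : List (Int × β)) (hl : (l.map Prod.fst).Nodup)
    (g : Int → β → Int) (dflt : β) (c : Int) :
    (PySem.Dict.mk l).keys.foldl (fun c k => g c ((PySem.Dict.mk l).getD k dflt)) c
      = l.foldl (fun c p => g c p.2) c := by
  have hkeys : (PySem.Dict.mk l).keys = l.map Prod.fst := rfl
  rw [hkeys, List.foldl_map]
  refine PySem.List.foldl_congr_mem l _ _ c (fun acc p hp => ?_)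
  have : (PySem.Dict.mk l).getD p.1 dflt = p.2 :=
    PySem.Dict.getD_of_mem_items (d := PySem.Dict.mk l) (k := p.1) (v := p.2) hp hl dflt
  rw [this]

-- each of A's loops adds, to its incoming counter, exactly B's walk of that level
theorem pv_levelW (l : List (Int × Bool)) (hl : (l.map Prod.fst).Nodup) (c : Int) :
    (PySem.Dict.mk l).keys.foldl (fun counter w =>
        if (PySem.Dict.mk l).getD w false then counter + 1 else counter) c
      = c + pvWalkW l := by
  rw [pv_keys_fold l hl (fun c b => if b then c + 1 else c) false c]
  have : ∀ (acc : Int) (p : Int × Bool), (if p.2 then acc + 1 else acc) = acc + pvWalkLeaf p.2 := by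
    intro acc p; unfold pvWalkLeaf; split <;> omega
  calc l.foldl (fun c p => if p.2 then c + 1 else c) c
      = l.foldl (fun c p => c + pvWalkLeaf p.2) c :=
        PySem.List.foldl_congr_mem l _ _ c (fun acc p _ => this acc p)
    _ = c + pvWalkW l := PySem.List.foldl_add l (fun p => pvWalkLeaf p.2) c

theorem pv_levelZ (l : List (Int × List (Int × Bool)))
    (hl : (l.map Prod.fst).Nodup) (hin : ∀ r ∈ l, (r.2.map Prod.fst).Nodup) (c : Int) :
    (PySem.Dict.mk l).keys.foldl (fun counter z =>
        let dz := PySem.Dict.mk ((PySem.Dict.mk l).getD z [])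
        dz.keys.foldl (fun counter w => if dz.getD w false then counter + 1 else counter) counter) c
      = c + pvWalkZ l := by
  rw [pv_keys_fold l hl (fun counter v =>
        (PySem.Dict.mk v).keys.foldl (fun counter w =>
          if (PySem.Dict.mk v).getD w false then counter + 1 else counter) counter) [] c]
  calc l.foldl (fun counter p =>
          (PySem.Dict.mk p.2).keys.foldl (fun counter w =>
            if (PySem.Dict.mk p.2).getD w false then counter + 1 else counter) counter) c
      = l.foldl (fun c p => c + pvWalkW p.2) c :=
        PySem.List.foldl_congr_mem l _ _ c (fun acc p hp => pv_levelW p.2 (hin p hp) acc)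
    _ = c + pvWalkZ l := PySem.List.foldl_add l (fun p => pvWalkW p.2) c

theorem pv_levelY (l : List (Int × List (Int × List (Int × Bool))))
    (hl : (l.map Prod.fst).Nodup)
    (hin : ∀ q ∈ l, (q.2.map Prod.fst).Nodup ∧ ∀ r ∈ q.2, (r.2.map Prod.fst).Nodup) (c : Int) :
    (PySem.Dict.mk l).keys.foldl (fun counter y =>
        let dy := PySem.Dict.mk ((PySem.Dict.mk l).getD y [])
        dy.keys.foldl (fun counter z =>
          let dz := PySem.Dict.mk (dy.getD z [])
          dz.keys.foldl (fun counter w => if dz.getD w false then counter + 1 else counter) counter) counter) c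
      = c + pvWalkY l := by
  rw [pv_keys_fold l hl (fun counter v =>
        (PySem.Dict.mk v).keys.foldl (fun counter z =>
          let dz := PySem.Dict.mk ((PySem.Dict.mk v).getD z [])
          dz.keys.foldl (fun counter w => if dz.getD w false then counter + 1 else counter) counter) counter) [] c]
  calc l.foldl (fun counter p =>
          (PySem.Dict.mk p.2).keys.foldl (fun counter z =>
            let dz := PySem.Dict.mk ((PySem.Dict.mk p.2).getD z [])
            dz.keys.foldl (fun counter w => if dz.getD w false then counter + 1 else counter) counter) counter) c
      = l.foldl (fun c p => c + pvWalkZ p.2) c :=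
        PySem.List.foldl_congr_mem l _ _ c (fun acc p hp => pv_levelZ p.2 (hin p hp).1 (hin p hp).2 acc)
    _ = c + pvWalkY l := PySem.List.foldl_add l (fun p => pvWalkZ p.2) c

-- ===== VERDICT (by name: the statement is the Claim_ definition above) =====
theorem count_active_cubes_4_spec : Claim_equal_count_active_cubes_4 := by
  intro cubes _ hpre
  unfold Spec_count_active_cubes_4 count_active_cubes_4 count_active_cubes_4_alt
  obtain ⟨h1, h2⟩ := hpre
  rw [pv_keys_fold cubes h1 (fun counter v =>
        (PySem.Dict.mk v).keys.foldl (fun counter y =>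
          let dy := PySem.Dict.mk ((PySem.Dict.mk v).getD y [])
          dy.keys.foldl (fun counter z =>
            let dz := PySem.Dict.mk (dy.getD z [])
            dz.keys.foldl (fun counter w => if dz.getD w false then counter + 1 else counter) counter) counter) counter) [] 0]
  calc cubes.foldl (fun counter p =>
          (PySem.Dict.mk p.2).keys.foldl (fun counter y =>
            let dy := PySem.Dict.mk ((PySem.Dict.mk p.2).getD y [])
            dy.keys.foldl (fun counter z =>
              let dz := PySem.Dict.mk (dy.getD z [])
              dz.keys.foldl (fun counter w => if dz.getD w false then counter + 1 else counter) counter) counter) counter) 0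
      = cubes.foldl (fun c p => c + pvWalkY p.2) 0 :=
        PySem.List.foldl_congr_mem cubes _ _ 0 (fun acc p hp => pv_levelY p.2 (h2 p hp).1 (h2 p hp).2 acc)
    _ = 0 + (cubes.map (fun p => pvWalkY p.2)).sum :=
        PySem.List.foldl_add cubes (fun p => pvWalkY p.2) 0
    _ = (cubes.map (fun p => pvWalkY p.2)).sum := by omega
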